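-- pv_equiv track=rewrite | github.com/mranjbar3/kml | kml_producer.py | str2blks
-- ===== SOURCE A (Python) =====
-- hex_chr = "0123456789abcdef"
--
-- def str2blks(n):
--     n = str(n) + hex_chr
--     nblk = (len(n) + 8 >> 6) + 1
--     blks = []
--     for i in range(nblk * 16):
--         blks.append(0)
--     for i in range(len(n)):
--         blks[i >> 2] |= ord(n[i]) << i % 4 * 8
--     i += 1
--     blks[i >> 2] |= (128 << i % 4 * 8)
--     blks[nblk * 16 - 2] = len(n) * 8
--     return blks
-- ===== SOURCE B (Python) =====
-- hex_chr = "0123456789abcdef"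
--
-- def str2blks(n):
--     s = str(n) + hex_chr
--     nblk = ((len(s) + 8) >> 6) + 1
--     data = [ord(c) for c in s] + [128]
--     data += [0] * (nblk * 64 - len(data))
--     blks = [data[4 * w] | data[4 * w + 1] << 8 | data[4 * w + 2] << 16 | data[4 * w + 3] << 24
--             for w in range(nblk * 16)]
--     blks[nblk * 16 - 2] = len(s) * 8
--     return blks
-- ===== Notes on version B (the rewrite author's own statement) =====
-- stated objective: alternative
-- what changed: B builds the complete padded byte buffer (character codes, marker byte, zero padding) first and then assembles each four-byte word from its four bytes little-endian, instead of A's in-place OR-accumulation of shifted bytes into a pre-zeroed word array.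
import Mathlib
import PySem

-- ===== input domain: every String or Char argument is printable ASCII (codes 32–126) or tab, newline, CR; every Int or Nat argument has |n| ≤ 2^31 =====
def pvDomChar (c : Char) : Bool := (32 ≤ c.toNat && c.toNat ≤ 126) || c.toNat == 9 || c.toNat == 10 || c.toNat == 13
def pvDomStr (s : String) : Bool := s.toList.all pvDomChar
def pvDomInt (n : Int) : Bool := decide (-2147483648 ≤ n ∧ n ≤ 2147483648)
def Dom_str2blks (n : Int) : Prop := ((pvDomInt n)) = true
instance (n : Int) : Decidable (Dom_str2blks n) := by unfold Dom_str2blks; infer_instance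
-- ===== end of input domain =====

-- B builds the padded byte buffer first and assembles each four-byte word from its four bytes,
-- instead of OR-accumulating bytes into a zeroed word array; same cost, a different decomposition.

-- ===== PORT A =====
def hexChr : String := "0123456789abcdef"

def str2blks (n : Int) : List Int :=
  let s := (PySem.Int.toStr n ++ hexChr).toList
  let len := s.length
  let nblk := ((len + 8) >>> 6) + 1
  let blks := List.replicate (nblk * 16) (0 : Int)
  let blks := (List.range len).foldl
    (fun b i => b.set (i >>> 2)
      (PySem.Int.bor (b.getD (i >>> 2) 0) ((((s.getD i ' ').toNat : Int) <<< (i % 4 * 8) : Int)))) blks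
  let i := len
  let blks := blks.set (i >>> 2) (PySem.Int.bor (blks.getD (i >>> 2) 0) (((128 : Int) <<< (i % 4 * 8) : Int)))
  blks.set (nblk * 16 - 2) (len * 8)

-- ===== PORT B =====
def str2blks_alt (n : Int) : List Int :=
  let s := (PySem.Int.toStr n ++ hexChr).toList
  let len := s.length
  let nblk := (len + 8) / 64 + 1
  let data := s.map (fun c => (c.toNat : Int)) ++ [128] ++ List.replicate (nblk * 64 - (len + 1)) (0 : Int)
  let blks := (List.range (nblk * 16)).map (fun w =>
      PySem.Int.bor (PySem.Int.bor (PySem.Int.bor (data.getD (4 * w) 0) (data.getD (4 * w + 1) 0 <<< (8 : Nat))) (data.getD (4 * w + 2) 0 <<< (16 : Nat))) (data.getD (4 * w + 3) 0 <<< (24 : Nat)))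
  blks.set (nblk * 16 - 2) (len * 8)

-- ===== PRECONDITION & SPEC =====
def Spec_str2blks (n : Int) (out : List Int) : Prop := out = str2blks_alt n
instance (n : Int) (out : List Int) : Decidable (Spec_str2blks n out) := by unfold Spec_str2blks; infer_instance

-- ===== CLAIM (what is proved, stated in full; the proofs are below) =====
def Claim_equal_str2blks : Prop := ∀ (n : Int), Dom_str2blks n → Spec_str2blks n (str2blks n)

-- ===== LEMMAS AND PROOFS =====

-- the word that bytes g(4w)..g(4w+3) assemble to, little-endian
def pvWordAt (g : Nat → Int) (w : Nat) : Int :=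
  PySem.Int.bor (PySem.Int.bor (PySem.Int.bor (g (4 * w)) (g (4 * w + 1) <<< (8 : Nat))) (g (4 * w + 2) <<< (16 : Nat))) (g (4 * w + 3) <<< (24 : Nat))

def pvWords (g : Nat → Int) (N : Nat) : List Int := (List.range N).map (pvWordAt g)

def pvOrd (s : List Char) (p : Nat) : Int := ((s.getD p ' ').toNat : Int)

lemma pvWords_congr (g g' : Nat → Int) (N : Nat) (h : ∀ p, g p = g' p) :
    pvWords g N = pvWords g' N := by
  have : g = g' := funext h
  rw [this]

lemma pvWords_length (g : Nat → Int) (N : Nat) : (pvWords g N).length = N := by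
  simp [pvWords]

lemma pvWords_getElem (g : Nat → Int) (N w : Nat) (hw : w < N) :
    (pvWords g N)[w]'(by simpa [pvWords_length] using hw) = pvWordAt g w := by
  simp [pvWords]

lemma pvWords_getD (g : Nat → Int) (N w : Nat) (hw : w < N) :
    (pvWords g N).getD w 0 = pvWordAt g w := by
  rw [List.getD_eq_getElem _ _ (by simpa [pvWords_length] using hw)]
  exact pvWords_getElem g N w hw

lemma pvStep (g : Nat → Int) (N i : Nat) (c : Int) (hi : i < 4 * N)
    (hz : ∀ p, i ≤ p → g p = 0) :
    (pvWords g N).set (i >>> 2) (PySem.Int.bor ((pvWords g N).getD (i >>> 2) 0) ((c <<< (i % 4 * 8) : Int)))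
      = pvWords (fun p => if p = i then c else g p) N := by
  have hsr : i >>> 2 = i / 4 := by
    simp [Nat.shiftRight_eq_div_pow]
  have hdiv : i / 4 < N := by omega
  rw [hsr, pvWords_getD g N (i / 4) hdiv]
  apply List.ext_getElem
  · simp [pvWords_length]
  · intro w hw1 hw2
    have hwN : w < N := by simpa [pvWords_length] using hw2
    rw [List.getElem_set]
    by_cases hwi : w = i / 4
    · subst hwi
      rw [if_pos rfl]
      simp only [pvWords, List.getElem_map, List.getElem_range]
      have hr4 : i % 4 = 0 ∨ i % 4 = 1 ∨ i % 4 = 2 ∨ i % 4 = 3 := by omega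
      rcases hr4 with hr | hr | hr | hr <;>
        unfold pvWordAt <;>
        [ (rw [show 4 * (i / 4) = i by omega];
           have z0 : g i = 0 := hz i (by omega);
           have n1 : ¬ (i + 1 = i) := by omega;
           have z1 : g (i + 1) = 0 := hz _ (by omega);
           have n2 : ¬ (i + 2 = i) := by omega;
           have z2 : g (i + 2) = 0 := hz _ (by omega);
           have n3 : ¬ (i + 3 = i) := by omega;
           have z3 : g (i + 3) = 0 := hz _ (by omega);
           simp [z0, z1, z2, z3, hr, PySem.Int.bor_zero, PySem.Int.bor_comm]);
          (have n0 : ¬ (4 * (i / 4) = i) := by omega;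
           have e1 : 4 * (i / 4) + 1 = i := by omega;
           have zi : g i = 0 := hz i le_rfl;
           have z1 : g (4 * (i / 4) + 1) = 0 := hz _ (by omega);
           have n2 : ¬ (4 * (i / 4) + 2 = i) := by omega;
           have z2 : g (4 * (i / 4) + 2) = 0 := hz _ (by omega);
           have n3 : ¬ (4 * (i / 4) + 3 = i) := by omega;
           have z3 : g (4 * (i / 4) + 3) = 0 := hz _ (by omega);
           simp [n0, e1, zi, z2, z3, n2, n3, hr, PySem.Int.bor_zero]);
          (have n0 : ¬ (4 * (i / 4) = i) := by omega;
           have n1 : ¬ (4 * (i / 4) + 1 = i) := by omega;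
           have e2 : 4 * (i / 4) + 2 = i := by omega;
           have zi : g i = 0 := hz i le_rfl;
           have z2 : g (4 * (i / 4) + 2) = 0 := hz _ (by omega);
           have n3 : ¬ (4 * (i / 4) + 3 = i) := by omega;
           have z3 : g (4 * (i / 4) + 3) = 0 := hz _ (by omega);
           simp [n0, n1, e2, zi, z3, n3, hr, PySem.Int.bor_zero]);
          (have n0 : ¬ (4 * (i / 4) = i) := by omega;
           have n1 : ¬ (4 * (i / 4) + 1 = i) := by omega;
           have n2 : ¬ (4 * (i / 4) + 2 = i) := by omega;
           have e3 : 4 * (i / 4) + 3 = i := by omega;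
           have zi : g i = 0 := hz i le_rfl;
           have z3 : g (4 * (i / 4) + 3) = 0 := hz _ (by omega);
           simp [n0, n1, n2, e3, zi, hr, PySem.Int.bor_zero]) ]
    · rw [if_neg (fun h => hwi h.symm)]
      simp only [pvWords, List.getElem_map, List.getElem_range]
      unfold pvWordAt
      have h0 : 4 * w ≠ i := by omega
      have h1 : 4 * w + 1 ≠ i := by omega
      have h2 : 4 * w + 2 ≠ i := by omega
      have h3 : 4 * w + 3 ≠ i := by omega
      simp [h0, h1, h2, h3]

lemma pvFold (s : List Char) (N k : Nat) (hk : k ≤ 4 * N) :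
    (List.range k).foldl
      (fun b i => b.set (i >>> 2)
        (PySem.Int.bor (b.getD (i >>> 2) 0) ((((s.getD i ' ').toNat : Int) <<< (i % 4 * 8) : Int))))
      (List.replicate N (0 : Int))
      = pvWords (fun p => if p < k then pvOrd s p else 0) N := by
  induction k with
  | zero =>
    simp only [List.range_zero, List.foldl_nil, Nat.not_lt_zero, if_false]
    apply List.ext_getElem
    · simp [pvWords_length]
    · intro w h1 h2
      have hwN : w < N := by simpa using h1
      simp [pvWords, pvWordAt, PySem.Int.bor_zero]
  | succ k ih =>
    rw [List.range_succ, List.foldl_append, List.foldl_cons, List.foldl_nil,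
        ih (by omega),
        pvStep _ N k (((s.getD k ' ').toNat : Int)) (by omega) (fun p hp => if_neg (by omega))]
    apply pvWords_congr
    intro p
    by_cases hp : p = k
    · subst hp; simp [pvOrd]
    · by_cases hp2 : p < k <;> simp [hp, hp2] <;> omega

lemma pvData_getD (s : List Char) (m : Nat) (p : Nat) :
    ((List.map (fun c => ((Char.toNat c : Nat) : Int)) s ++ 128 :: List.replicate m (0 : Int))[p]?.getD 0)
      = if p = s.length then 128 else if p < s.length then pvOrd s p else 0 := by
  rcases lt_trichotomy p s.length with hp | hp | hp
  · rw [List.getElem?_append_left (by simpa using hp), List.getElem?_map]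
    simp [hp, pvOrd, Nat.ne_of_lt hp]
  · subst hp
    rw [List.getElem?_append_right (by simp)]
    simp
  · rw [List.getElem?_append_right (by simp; omega)]
    have hne : ¬ (p = s.length) := by omega
    have hlt : ¬ (p < s.length) := by omega
    have hc : p - (List.map (fun c => ((Char.toNat c : Nat) : Int)) s).length
        = (p - s.length - 1) + 1 := by simp; omega
    rw [hc]
    simp only [hne, hlt, if_false, List.getElem?_cons_succ]
    by_cases hm : p - s.length - 1 < m
    · rw [List.getElem?_replicate_of_lt hm]
      rfl
    · rw [List.getElem?_eq_none (by simp; omega)]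
      rfl

-- ===== VERDICT (by name: the statement is the Claim_ definition above) =====
theorem str2blks_spec : Claim_equal_str2blks := by
  intro n _
  unfold Spec_str2blks
  simp only [str2blks, str2blks_alt]
  generalize (PySem.Int.toStr n ++ hexChr).toList = s
  have h64 : (s.length + 8) >>> 6 = (s.length + 8) / 64 := by
    simp [Nat.shiftRight_eq_div_pow]
  rw [h64]
  have hlen : s.length ≤ 4 * (((s.length + 8) / 64 + 1) * 16) := by omega
  rw [pvFold s (((s.length + 8) / 64 + 1) * 16) s.length hlen,
      pvStep _ _ s.length 128 (by omega) (fun p hp => if_neg (by omega))]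
  apply congrArg (fun l => List.set l ((((s.length + 8) / 64 + 1) * 16) - 2) ((s.length : Int) * 8))
  apply List.ext_getElem
  · simp [pvWords_length]
  · intro w h1 h2
    simp [pvWords, pvWordAt, pvData_getD]
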